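-- pv_equiv track=rewrite | github.com/ryunada/Coding_Test_Practice | Ryu/Programmers/python/Lv0/숨어있는 숫자의 덧셈 (2).py | solution
-- ===== SOURCE A (Python) =====
-- def solution(my_string):
--     result = 0
--     str = ''
--     for i in my_string:
--         # 숫자면 str에 문자열로 집어넣기
--         if i.isdigit() == 1:
--             str += i
--         else:
--             # str이 비어져있으면 통과
--             if len(str) == 0:
--                 continue
--             # 숫자가 아니고 문자인 경우 멈춰서 이때까지의 str 더해주기
--             result += int(str)
--             str = ''
--
--     # 마지막에 숫자가 오는 경우
--     if len(str) != 0: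
--         result += int(str)
--     return result
-- ===== SOURCE B (Python) =====
-- def solution(my_string):
--     cleaned = ''.join(c if c.isdigit() else ' ' for c in my_string)
--     return sum(int(tok) for tok in cleaned.split())
-- ===== Notes on version B (the rewrite author's own statement) =====
-- stated objective: idiomatic
-- what changed: Replaces A's accumulate-and-flush loop with explicit run state by a two-phase pipeline: map non-digits to spaces, then sum int() over str.split() tokens.
import Mathlib
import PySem

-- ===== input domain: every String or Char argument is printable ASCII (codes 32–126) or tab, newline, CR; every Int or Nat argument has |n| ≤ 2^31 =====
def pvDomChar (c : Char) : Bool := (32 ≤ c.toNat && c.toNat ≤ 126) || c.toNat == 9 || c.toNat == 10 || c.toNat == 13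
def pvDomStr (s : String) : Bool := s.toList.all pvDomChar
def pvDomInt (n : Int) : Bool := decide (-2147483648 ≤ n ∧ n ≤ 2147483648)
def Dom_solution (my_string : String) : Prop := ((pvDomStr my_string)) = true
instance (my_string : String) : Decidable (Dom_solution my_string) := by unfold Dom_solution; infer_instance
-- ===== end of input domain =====

-- B replaces A's accumulate-and-flush loop by a normalize-then-split pipeline (same cost; more idiomatic).

-- ===== PORT A =====
-- A's running digit buffer `str` is held as a List Char; int(str) → PySem.Int.ofChars?
-- (whenever A calls int(str), str is a nonempty run of isdigit characters, so ofChars? is some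
-- on the ASCII domain; .getD 0 is never taken there).
def solution (my_string : String) : Int :=
  let st := my_string.toList.foldl
    (fun (st : Int × List Char) i =>
      if PySem.Chars.isdigit i then (st.1, st.2 ++ [i])
      else if st.2.length = 0 then st
      else (st.1 + (PySem.Int.ofChars? st.2).getD 0, []))
    ((0 : Int), ([] : List Char))
  if st.2.length ≠ 0 then st.1 + (PySem.Int.ofChars? st.2).getD 0 else st.1

-- ===== PORT B =====
-- ''.join(generator) → String.mk of the mapped char list; .split() → PySem.Str.split₀;
-- int(tok) → PySem.Int.ofStr? (some on every token: each is a nonempty ASCII digit run);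
-- sum(generator) → foldl (+) 0.
def solution_alt (my_string : String) : Int :=
  let cleaned : String :=
    String.ofList (my_string.toList.map (fun c => if PySem.Chars.isdigit c then c else ' '))
  (PySem.Str.split₀ cleaned).foldl (fun acc tok => acc + (PySem.Int.ofStr? tok).getD 0) 0

-- ===== PRECONDITION & SPEC =====
def Spec_solution (my_string : String) (out : Int) : Prop := out = solution_alt my_string
instance (my_string : String) (out : Int) : Decidable (Spec_solution my_string out) := by unfold Spec_solution; infer_instance

-- ===== CLAIM (what is proved, stated in full; the proofs are below) =====
def Claim_equal_solution : Prop := ∀ (my_string : String), Dom_solution my_string → Spec_solution my_string (solution my_string)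

-- ===== LEMMAS AND PROOFS =====

def pvVal (cs : List Char) : Int := (PySem.Int.ofChars? cs).getD 0

def pvClean (c : Char) : Char := if PySem.Chars.isdigit c then c else ' '

def pvSumTok (ts : List (List Char)) : Int := ts.foldl (fun a t => a + pvVal t) 0

theorem pvSumTok_init (ts : List (List Char)) (a : Int) :
    ts.foldl (fun a t => a + pvVal t) a = a + pvSumTok ts := by
  induction ts generalizing a with
  | nil => simp [pvSumTok]
  | cons t ts ih =>
    rw [List.foldl_cons, ih]
    conv_rhs => rw [pvSumTok, List.foldl_cons, ih]
    ring

theorem split₀_go_acc (cs : List Char) (cur : List Char) (acc : List (List Char)) :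
    PySem.Chars.split₀.go cs cur acc = acc.reverse ++ PySem.Chars.split₀.go cs cur [] := by
  induction cs generalizing cur acc with
  | nil =>
    rw [PySem.Chars.split₀.go.eq_1, PySem.Chars.split₀.go.eq_1]
    by_cases h : cur.isEmpty = true
    · rw [if_pos h, if_pos h]; simp
    · rw [if_neg h, if_neg h]; simp
  | cons c rest ih =>
    rw [PySem.Chars.split₀.go.eq_2, PySem.Chars.split₀.go.eq_2]
    by_cases hs : PySem.Chars.isspace c = true
    · rw [if_pos hs, if_pos hs]
      by_cases h : cur.isEmpty = true
      · rw [if_pos h, if_pos h]; exact ih [] acc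
      · rw [if_neg h, if_neg h, ih [] (cur.reverse :: acc), ih [] [cur.reverse]]; simp
    · rw [if_neg hs, if_neg hs]; exact ih (c :: cur) acc

theorem pvSumTok_cons (t : List Char) (ts : List (List Char)) :
    pvSumTok (t :: ts) = pvVal t + pvSumTok ts := by
  conv_lhs => rw [pvSumTok, List.foldl_cons, pvSumTok_init]
  ring

theorem isdigit_not_isspace (c : Char) (h : PySem.Chars.isdigit c = true) :
    PySem.Chars.isspace c = false := by
  simp [PySem.Chars.isdigit] at h
  simp [PySem.Chars.isspace]
  have h1 : 48 ≤ c.toNat := h.1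
  have h2 : c.toNat ≤ 57 := h.2
  omega

theorem space_isspace : PySem.Chars.isspace ' ' = true := by decide

theorem pvMain (s : List Char) (r : Int) (buf : List Char) :
    (let st := s.foldl
        (fun (st : Int × List Char) i =>
          if PySem.Chars.isdigit i then (st.1, st.2 ++ [i])
          else if st.2.length = 0 then st
          else (st.1 + pvVal st.2, []))
        (r, buf)
      if st.2.length ≠ 0 then st.1 + pvVal st.2 else st.1)
    = r + pvSumTok (PySem.Chars.split₀.go (s.map pvClean) buf.reverse []) := by
  induction s generalizing r buf with
  | nil =>
    by_cases h : buf = []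
    · simp [h, PySem.Chars.split₀.go.eq_1, pvSumTok]
    · have : buf.length ≠ 0 := by simpa using h
      simp [PySem.Chars.split₀.go.eq_1, List.isEmpty_iff, h, this, pvSumTok, List.foldl]
  | cons c rest ih =>
    by_cases hd : PySem.Chars.isdigit c = true
    · have hns := isdigit_not_isspace c hd
      have := ih r (buf ++ [c])
      simp [List.foldl, hd, pvClean, PySem.Chars.split₀.go.eq_2, hns] at this ⊢
      simpa using this
    · by_cases h : buf = []
      · have := ih r []
        simp [List.foldl, hd, h, pvClean, PySem.Chars.split₀.go.eq_2, space_isspace] at this ⊢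
        exact this
      · have hlen : ¬ buf.length = 0 := by simpa using h
        have := ih (r + pvVal buf) []
        have hne : buf.reverse.isEmpty = false := by
          simp [h]
        simp [List.foldl, hd, hlen, pvClean, PySem.Chars.split₀.go.eq_2, space_isspace, hne] at this ⊢
        rw [split₀_go_acc _ [] [buf]]
        rw [List.reverse_singleton, List.singleton_append, pvSumTok_cons, this]
        ring

-- ===== VERDICT (by name: the statement is the Claim_ definition above) =====
theorem solution_spec : Claim_equal_solution := by
  intro s _
  unfold Spec_solution solution solution_alt
  have hmain := pvMain s.toList 0 []
  simp only [pvVal] at hmain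
  rw [hmain]
  dsimp only
  rw [PySem.Str.split₀.eq_1, List.foldl_map]
  have hc : pvClean = fun c => if PySem.Chars.isdigit c = true then c else ' ' := by
    funext c; rw [pvClean]
  simp [PySem.Chars.split₀, PySem.Int.ofStr?_ofList, hc, pvSumTok, pvVal]
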